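-- pv_equiv track=rewrite | github.com/FidelElie/PlateFinder | Libraries/Core/UnitChanger.py | standard_format
-- ===== SOURCE A (Python) =====
-- def standard_format(string, identifier):
--     """Creates Standard String Formats for Different Units"""
--     mod_string = []
--     for i in range(0, len(string)):
--         if (i == 2 or i == 4) and identifier == "angle:ra":
--             mod_string.append(":")
--         elif (i == 3 or i == 5) and identifier == "angle:dec":
--             mod_string.append(":")
--         elif (i == 4 or i == 6) and identifier == "date":
--             mod_string.append("/")
--         mod_string.append(string[i])
--     formatted_string = "".join(mod_string)
--     return formatted_string
-- ===== SOURCE B (Python) =====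
-- def standard_format(string, identifier):
--     """Creates Standard String Formats for Different Units"""
--     sep, cuts = {
--         "angle:ra": (":", [2, 4]),
--         "angle:dec": (":", [3, 5]),
--         "date": ("/", [4, 6]),
--     }.get(identifier, ("", []))
--     pieces = []
--     prev = 0
--     for c in cuts:
--         if c < len(string):
--             pieces.append(string[prev:c])
--             prev = c
--     pieces.append(string[prev:])
--     return sep.join(pieces)
-- ===== Notes on version B (the rewrite author's own statement) =====
-- stated objective: simpler
-- what changed: Replaced the per-character loop that tests each index against hard-coded insertion points with a table mapping each identifier to (separator, cut positions), slicing the string at the in-range cuts and joining the segments with the separator.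
import Mathlib
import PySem

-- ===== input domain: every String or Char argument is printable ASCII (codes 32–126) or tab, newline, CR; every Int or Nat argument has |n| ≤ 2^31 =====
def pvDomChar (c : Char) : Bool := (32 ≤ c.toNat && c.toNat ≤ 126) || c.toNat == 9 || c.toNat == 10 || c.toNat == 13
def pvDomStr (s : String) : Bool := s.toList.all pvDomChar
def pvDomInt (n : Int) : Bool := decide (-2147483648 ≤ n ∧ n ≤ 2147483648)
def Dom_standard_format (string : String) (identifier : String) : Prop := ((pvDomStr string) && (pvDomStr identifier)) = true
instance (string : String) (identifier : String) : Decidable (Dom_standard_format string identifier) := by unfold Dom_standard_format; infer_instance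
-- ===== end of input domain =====

-- B replaces A's per-character loop with insertion tests by a table of cut
-- positions and a segment-split-and-join pass (objective: simpler).

-- ===== PORT A =====
-- literal transliteration of A: loop i over range(0, len(string)), conditionally
-- append a separator before string[i]; "".join of 1-char strings = the char list.
def standard_format (string : String) (identifier : String) : String :=
  let cs := string.toList
  let mod_string : List Char :=
    (PySem.List.pyRange 0 (cs.length : Int) 1).foldl (fun acc i =>
      let acc :=
        if (i == 2 || i == 4) && identifier == "angle:ra" then acc ++ [':']
        else if (i == 3 || i == 5) && identifier == "angle:dec" then acc ++ [':']
        else if (i == 4 || i == 6) && identifier == "date" then acc ++ ['/']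
        else acc
      acc ++ [PySem.List.pyGetD cs i ' ']) []
  String.ofList mod_string

-- ===== PORT B =====
-- transliteration of B: table lookup of (separator, cuts), slice the string at
-- each in-range cut, join the pieces with the separator.
def standard_format_alt (string : String) (identifier : String) : String :=
  let cs := string.toList
  let sc : List Char × List Nat :=
    if identifier == "angle:ra" then ([':'], [2, 4])
    else if identifier == "angle:dec" then ([':'], [3, 5])
    else if identifier == "date" then (['/'], [4, 6])
    else ([], [])
  let st := sc.2.foldl (fun (st : List (List Char) × Nat) c =>
      if c < cs.length then
        (st.1 ++ [PySem.List.slice cs (some (st.2 : Int)) (some (c : Int))], c)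
      else st) ([], 0)
  String.ofList (PySem.Chars.join sc.1 (st.1 ++ [PySem.List.slice cs (some (st.2 : Int)) none]))

-- ===== PRECONDITION & SPEC =====
def Spec_standard_format (string : String) (identifier : String) (out : String) : Prop := out = standard_format_alt string identifier
instance (string : String) (identifier : String) (out : String) : Decidable (Spec_standard_format string identifier out) := by unfold Spec_standard_format; infer_instance

-- ===== CLAIM (what is proved, stated in full; the proofs are below) =====
def Claim_equal_standard_format : Prop := ∀ (string : String) (identifier : String), Dom_standard_format string identifier → Spec_standard_format string identifier (standard_format string identifier)

-- ===== LEMMAS AND PROOFS =====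

-- the loop body 'maybe append sep, then append the char' is a flatMap
lemma foldl_body_flat (cs : List Char) (P : Nat → Prop) [DecidablePred P] (sep : Char)
    (l : List Nat) (acc : List Char) :
    l.foldl (fun acc k => (if P k then acc ++ [sep] else acc) ++ [cs.getD k ' ']) acc
      = acc ++ l.flatMap (fun k => (if P k then [sep] else []) ++ [cs.getD k ' ']) := by
  induction l generalizing acc with
  | nil => simp
  | cons x xs ih =>
      simp only [List.foldl_cons, List.flatMap_cons, ih]
      split_ifs <;> simp

-- a stretch of indices where no separator fires contributes the plain segment
lemma seg (cs : List Char) (P : Nat → Prop) [DecidablePred P] (sep : Char) (a k : Nat)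
    (h : a + k ≤ cs.length) (hP : ∀ i, a ≤ i → i < a + k → ¬ P i) :
    (List.range' a k).flatMap (fun i => (if P i then [sep] else []) ++ [cs.getD i ' '])
      = (cs.drop a).take k := by
  induction k generalizing a with
  | zero => simp
  | succ k ih =>
      have ha : a < cs.length := by omega
      have hPa : ¬ P a := hP a le_rfl (by omega)
      rw [List.range'_succ, List.flatMap_cons,
        ih (a + 1) (by omega) (fun i h1 h2 => hP i (by omega) (by omega)),
        List.drop_eq_getElem_cons ha, List.take_succ_cons]
      simp [hPa, List.getD_eq_getElem?_getD, List.getElem?_eq_getElem ha]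

lemma range'_split (a b c : Nat) (h : b ≤ c) :
    List.range' a c = List.range' a b ++ List.range' (a + b) (c - b) := by
  conv_lhs => rw [show c = b + (c - b) by omega]
  rw [← List.range'_append]
  norm_num

-- A's loop with two cut positions p < q equals B's segment join
lemma master (cs : List Char) (p q : Nat) (sep : Char) (hpq : p < q) :
    (List.range cs.length).foldl
        (fun acc k => (if k = p ∨ k = q then acc ++ [sep] else acc) ++ [cs.getD k ' ']) []
      = PySem.Chars.join [sep]
          (if q < cs.length then [cs.take p, (cs.drop p).take (q - p), cs.drop q]
           else if p < cs.length then [cs.take p, cs.drop p]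
           else [cs]) := by
  have hflat := foldl_body_flat cs (fun k => k = p ∨ k = q) sep (List.range cs.length) []
  rw [hflat, List.nil_append, List.range_eq_range']
  by_cases hq : q < cs.length
  · have hp : p < cs.length := by omega
    rw [range'_split 0 p cs.length (by omega), Nat.zero_add,
      range'_split p 1 (cs.length - p) (by omega)]
    rw [range'_split (p + 1) (q - p - 1) (cs.length - p - 1) (by omega),
      show p + 1 + (q - p - 1) = q from by omega,
      show cs.length - p - 1 - (q - p - 1) = cs.length - q from by omega,
      range'_split q 1 (cs.length - q) (by omega)]
    simp only [List.flatMap_append, List.range'_one, List.flatMap_cons, List.flatMap_nil]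
    rw [seg cs _ sep 0 p (by omega) (fun i h1 h2 => by omega),
      seg cs _ sep (p + 1) (q - p - 1) (by omega) (fun i h1 h2 => by omega),
      seg cs _ sep (q + 1) (cs.length - q - 1) (by omega) (fun i h1 h2 => by omega)]
    have hdp : cs.drop p = cs[p] :: cs.drop (p + 1) := List.drop_eq_getElem_cons hp
    have hdq : cs.drop q = cs[q] :: cs.drop (q + 1) := List.drop_eq_getElem_cons hq
    have htk : (cs.drop p).take (q - p) = cs[p] :: (cs.drop (p + 1)).take (q - p - 1) := by
      obtain ⟨m, hm⟩ : ∃ m, q - p = m + 1 := ⟨q - p - 1, by omega⟩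
      rw [hdp, hm, List.take_succ_cons]
      norm_num
    have htl : (cs.drop (q + 1)).take (cs.length - q - 1) = cs.drop (q + 1) := by
      apply List.take_of_length_le; simp; try omega
    rw [if_pos hq]
    simp only [htl,
      List.getD_eq_getElem?_getD, List.getElem?_eq_getElem hp, List.getElem?_eq_getElem hq,
      Option.getD_some, List.drop_zero, htk, hdq,
      PySem.Chars.join_cons_cons, PySem.Chars.join_singleton]
    simp
  · by_cases hp : p < cs.length
    · rw [range'_split 0 p cs.length (by omega), Nat.zero_add,
        range'_split p 1 (cs.length - p) (by omega)]
      simp only [List.flatMap_append, List.range'_one, List.flatMap_cons, List.flatMap_nil]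
      rw [seg cs _ sep 0 p (by omega) (fun i h1 h2 => by omega),
        seg cs _ sep (p + 1) ((cs.length - p) - 1) (by omega) (fun i h1 h2 => by omega)]
      have hdp : cs.drop p = cs[p] :: cs.drop (p + 1) := List.drop_eq_getElem_cons hp
      have htl : (cs.drop (p + 1)).take ((cs.length - p) - 1) = cs.drop (p + 1) := by
        apply List.take_of_length_le; simp; try omega
      rw [if_neg hq, if_pos hp]
      simp only [htl,
        List.getD_eq_getElem?_getD, List.getElem?_eq_getElem hp, Option.getD_some,
        List.drop_zero, hdp, PySem.Chars.join_cons_cons, PySem.Chars.join_singleton]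
      simp
    · rw [seg cs _ sep 0 cs.length (by omega) (fun i h1 h2 => by omega)]
      rw [if_neg hq, if_neg hp]
      simp [PySem.Chars.join_singleton]

-- no identifier matched: the loop just copies the string
lemma plain (cs : List Char) :
    (List.range cs.length).foldl (fun acc k => acc ++ [cs.getD k ' ']) [] = cs := by
  have h2 := foldl_body_flat cs (fun _ => False) ' ' (List.range cs.length) []
  have h := seg cs (fun _ => False) ' ' 0 cs.length (by omega) (fun i _ _ => not_false)
  simp only [] at h
  rw [List.range_eq_range'] at h2 ⊢
  rw [h, List.drop_zero, List.take_length, List.nil_append] at h2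
  rw [show (fun (acc : List Char) (k : Nat) => acc ++ [cs.getD k ' '])
      = (fun (acc : List Char) (k : Nat) =>
          (if False then acc ++ [' '] else acc) ++ [cs.getD k ' ']) from by
    funext acc k; simp]
  exact h2

-- numeral bridges: the Int conditions of port A are the Nat conditions of master
lemma ic2 (k : Nat) : ((k : Int) = 2) ↔ k = 2 := by omega
lemma ic3 (k : Nat) : ((k : Int) = 3) ↔ k = 3 := by omega
lemma ic4 (k : Nat) : ((k : Int) = 4) ↔ k = 4 := by omega
lemma ic5 (k : Nat) : ((k : Int) = 5) ↔ k = 5 := by omega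
lemma ic6 (k : Nat) : ((k : Int) = 6) ↔ k = 6 := by omega

-- port A's pyRange fold over Int indices as a List.range fold over Nat indices
lemma pyRange_foldl_nat {α : Type} (n : Nat) (f : α → Int → α) (init : α) :
    (PySem.List.pyRange 0 (n : Int) 1).foldl f init
      = (List.range n).foldl (fun acc (k : Nat) => f acc (k : Int)) init := by
  have h : PySem.List.pyRange 0 (n : Int) 1 = (List.range n).map (fun k : Nat => (k : Int)) := by
    rw [PySem.List.pyRange_one]
    simp only [Int.sub_zero, Int.toNat_natCast, zero_add]
  rw [h, List.foldl_map]

-- B's two-cut fold, evaluated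
lemma altB (cs : List Char) (sep : List Char) (p q : Nat) (hpq : p < q) :
    (let st := [p, q].foldl (fun (st : List (List Char) × Nat) c =>
        if c < cs.length then
          (st.1 ++ [PySem.List.slice cs (some (st.2 : Int)) (some (c : Int))], c)
        else st) ([], 0)
     PySem.Chars.join sep (st.1 ++ [PySem.List.slice cs (some (st.2 : Int)) none]))
      = PySem.Chars.join sep
          (if q < cs.length then [cs.take p, (cs.drop p).take (q - p), cs.drop q]
           else if p < cs.length then [cs.take p, cs.drop p]
           else [cs]) := by
  by_cases hq : q < cs.length
  · have hp : p < cs.length := by omega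
    simp [List.foldl, hp, hq, PySem.List.slice_natCast, PySem.List.slice_from_natCast]
  · by_cases hp : p < cs.length
    · simp [List.foldl, hp, hq, PySem.List.slice_natCast, PySem.List.slice_from_natCast]
    · have hq' : ¬ q < cs.length := hq
      simp [List.foldl, hp, hq']

-- ===== VERDICT (by name: the statement is the Claim_ definition above) =====
theorem standard_format_spec : Claim_equal_standard_format := by
  intro s id _
  unfold Spec_standard_format standard_format standard_format_alt
  by_cases h1 : id = "angle:ra"
  · subst h1
    simp only [beq_self_eq_true, Bool.and_true,
      show (("angle:ra" : String) == "angle:dec") = false from by decide,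
      show (("angle:ra" : String) == "date") = false from by decide,
      Bool.and_false, if_true, Bool.false_eq_true, if_false]
    rw [pyRange_foldl_nat]
    have hbody : ∀ (acc : List Char) (k : Nat),
        ((if ((k : Int) == 2 || (k : Int) == 4) = true then acc ++ [':'] else acc)
          ++ [PySem.List.pyGetD s.toList (k : Int) ' '])
        = ((if k = 2 ∨ k = 4 then acc ++ [':'] else acc) ++ [s.toList.getD k ' ']) := by
      intro acc k
      simp [beq_iff_eq, ic2, ic4]
    simp only [hbody]
    rw [master s.toList 2 4 ':' (by omega), ← altB s.toList [':'] 2 4 (by omega)]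
  · by_cases h2 : id = "angle:dec"
    · subst h2
      simp only [beq_self_eq_true, Bool.and_true,
        show (("angle:dec" : String) == "angle:ra") = false from by decide,
        show (("angle:dec" : String) == "date") = false from by decide,
        Bool.and_false, if_true, Bool.false_eq_true, if_false]
      rw [pyRange_foldl_nat]
      have hbody : ∀ (acc : List Char) (k : Nat),
          ((if ((k : Int) == 3 || (k : Int) == 5) = true then acc ++ [':'] else acc)
            ++ [PySem.List.pyGetD s.toList (k : Int) ' '])
          = ((if k = 3 ∨ k = 5 then acc ++ [':'] else acc) ++ [s.toList.getD k ' ']) := by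
        intro acc k
        simp [beq_iff_eq, ic3, ic5]
      simp only [hbody]
      rw [master s.toList 3 5 ':' (by omega), ← altB s.toList [':'] 3 5 (by omega)]
    · by_cases h3 : id = "date"
      · subst h3
        simp only [beq_self_eq_true, Bool.and_true,
          show (("date" : String) == "angle:ra") = false from by decide,
          show (("date" : String) == "angle:dec") = false from by decide,
          Bool.and_false, if_true, Bool.false_eq_true, if_false]
        rw [pyRange_foldl_nat]
        have hbody : ∀ (acc : List Char) (k : Nat),
            ((if ((k : Int) == 4 || (k : Int) == 6) = true then acc ++ ['/'] else acc)
              ++ [PySem.List.pyGetD s.toList (k : Int) ' '])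
            = ((if k = 4 ∨ k = 6 then acc ++ ['/'] else acc) ++ [s.toList.getD k ' ']) := by
          intro acc k
          simp [beq_iff_eq, ic4, ic6]
        simp only [hbody]
        rw [master s.toList 4 6 '/' (by omega), ← altB s.toList ['/'] 4 6 (by omega)]
      · have b1 : (id == "angle:ra") = false := by simpa using h1
        have b2 : (id == "angle:dec") = false := by simpa using h2
        have b3 : (id == "date") = false := by simpa using h3
        simp only [b1, b2, b3, Bool.and_false, Bool.false_eq_true, if_false]
        rw [pyRange_foldl_nat]
        simp only [PySem.List.pyGetD_natCast]
        rw [plain]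
        simp [List.foldl, PySem.Chars.join_singleton]
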